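-- pv_equiv track=rewrite | github.com/kao273183/tower-defense | main.py | _tower_element_keys
-- ===== SOURCE A (Python) =====
-- ELEMENT_ALIAS = {
--     'thunder': 'lightning',
--     'lightning': 'lightning',
--     'wind': 'wind',
--     'fire': 'fire',
--     'water': 'water',
--     'ice': 'ice',
--     'poison': 'poison',
--     'land': 'earth',
--     'earth': 'earth',
-- }
--
-- def _tower_element_keys(tower):
--     keys = []
--     elem = tower.get('element')
--     ttype = tower.get('type', 'arrow')
--     for raw in filter(None, (elem, ttype)):
--         alias = ELEMENT_ALIAS.get(raw, raw)
--         if raw not in keys: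
--             keys.append(raw)
--         if alias not in keys:
--             keys.append(alias)
--     return keys
-- ===== SOURCE B (Python) =====
-- ELEMENT_ALIAS = {
--     'thunder': 'lightning',
--     'lightning': 'lightning',
--     'wind': 'wind',
--     'fire': 'fire',
--     'water': 'water',
--     'ice': 'ice',
--     'poison': 'poison',
--     'land': 'earth',
--     'earth': 'earth',
-- }
--
-- def _nub(xs):
--     # dedup keeping first occurrences: take the head, purge it from the tail, recurse
--     if not xs:
--         return []
--     head = xs[0]
--     return [head] + _nub([y for y in xs[1:] if y != head])
--
-- def _tower_element_keys(tower):
--     elem = tower.get('element')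
--     ttype = tower.get('type', 'arrow')
--     cands = [k for raw in (elem, ttype) if raw
--                for k in (raw, ELEMENT_ALIAS.get(raw, raw))]
--     return _nub(cands)
-- ===== Notes on version B (the rewrite author's own statement) =====
-- stated objective: alternative
-- what changed: B generates the flat raw/alias candidate list with one comprehension and deduplicates it by a recursive nub that filters each head out of the remaining tail, instead of A's single loop that membership-checks each item against the accumulated result list.
import Mathlib
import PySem

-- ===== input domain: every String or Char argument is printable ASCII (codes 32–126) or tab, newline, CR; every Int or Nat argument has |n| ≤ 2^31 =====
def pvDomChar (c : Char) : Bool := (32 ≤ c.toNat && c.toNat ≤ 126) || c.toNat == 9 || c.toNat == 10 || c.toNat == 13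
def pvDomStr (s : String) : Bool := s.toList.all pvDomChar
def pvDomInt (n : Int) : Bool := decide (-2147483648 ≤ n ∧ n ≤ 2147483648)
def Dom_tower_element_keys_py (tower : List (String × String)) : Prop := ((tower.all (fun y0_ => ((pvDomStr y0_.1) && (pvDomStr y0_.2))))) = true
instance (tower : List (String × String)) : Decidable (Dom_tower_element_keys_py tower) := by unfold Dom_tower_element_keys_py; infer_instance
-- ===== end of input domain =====

-- B generates the flat raw/alias candidate list and deduplicates it with a recursive
-- head-keeping nub that filters the head out of the tail; objective: alternative decomposition.


-- module constant ELEMENT_ALIAS (shared context of both versions)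
def pvElementAlias : PySem.Dict String String :=
  PySem.Dict.ofList [("thunder", "lightning"), ("lightning", "lightning"),
    ("wind", "wind"), ("fire", "fire"), ("water", "water"), ("ice", "ice"),
    ("poison", "poison"), ("land", "earth"), ("earth", "earth")]

-- 'for raw in (elem, ttype) if raw' / filter(None, (elem, ttype)): drops None and the empty (falsy) string
def pvTruthyCands (elem : Option String) (ttype : String) : List String :=
  (match elem with
   | none => []
   | some e => if e = "" then [] else [e]) ++
  (if ttype = "" then [] else [ttype])

-- ===== PORT A =====
def tower_element_keys_py (tower : List (String × String)) : List String :=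
  let d := PySem.Dict.mk tower
  let elem := d.get? "element"
  let ttype := d.getD "type" "arrow"
  (pvTruthyCands elem ttype).foldl (fun keys raw =>
    let aliasv := pvElementAlias.getD raw raw
    let keys := if keys.contains raw then keys else keys ++ [raw]
    if keys.contains aliasv then keys else keys ++ [aliasv]) []

-- ===== PORT B =====
-- _nub: keep the head, purge it from the tail, recurse
def pvNub : List String → List String
  | [] => []
  | x :: xs => x :: pvNub (xs.filter (fun y => y ≠ x))
termination_by xs => xs.length
decreasing_by simpa using le_trans (List.length_filter_le _ _) List.length_attach.le

def tower_element_keys_py_alt (tower : List (String × String)) : List String :=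
  let d := PySem.Dict.mk tower
  let elem := d.get? "element"
  let ttype := d.getD "type" "arrow"
  let cands := (pvTruthyCands elem ttype).flatMap
    (fun raw => [raw, pvElementAlias.getD raw raw])
  pvNub cands

-- ===== PRECONDITION & SPEC =====
def Spec_tower_element_keys_py (tower : List (String × String)) (out : List String) : Prop := out = tower_element_keys_py_alt tower
instance (tower : List (String × String)) (out : List String) : Decidable (Spec_tower_element_keys_py tower out) := by unfold Spec_tower_element_keys_py; infer_instance

-- ===== CLAIM =====
def Claim_equal_tower_element_keys_py : Prop := ∀ (tower : List (String × String)), Dom_tower_element_keys_py tower → Spec_tower_element_keys_py tower (tower_element_keys_py tower)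

-- ===== LEMMAS AND PROOFS =====

-- A's interleaved add-raw-then-add-aliasv loop is the Set.add fold over the flattened candidates.
theorem pv_fold_interleave (cs : List String) (acc : List String) :
    cs.foldl (fun keys raw =>
      let aliasv := pvElementAlias.getD raw raw
      let keys := if keys.contains raw then keys else keys ++ [raw]
      if keys.contains aliasv then keys else keys ++ [aliasv]) acc
    = (cs.flatMap (fun r => [r, pvElementAlias.getD r r])).foldl PySem.Set.add acc := by
  induction cs generalizing acc with
  | nil => rfl
  | cons c cs ih =>
    simp only [List.foldl_cons, List.flatMap_cons, List.foldl_append, ih]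
    rfl

theorem pvNub_nil : pvNub [] = [] := by rw [pvNub.eq_def]

theorem pvNub_cons (x : String) (xs : List String) :
    pvNub (x :: xs) = x :: pvNub (xs.filter (fun y => y ≠ x)) := by rw [pvNub.eq_def]

-- the membership-checking fold equals: emit nub of the elements not already in acc
theorem pv_foldl_add_eq_nub (cs : List String) (acc : List String) :
    cs.foldl PySem.Set.add acc = acc ++ pvNub (cs.filter (fun c => !(acc.contains c))) := by
  induction cs generalizing acc with
  | nil => simp [pvNub_nil]
  | cons c cs ih =>
    simp only [List.foldl_cons, List.filter_cons]
    by_cases h : c ∈ acc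
    · simp [PySem.Set.add, h, ih]
    · have hadd : PySem.Set.add acc c = acc ++ [c] := by simp [PySem.Set.add, h]
      rw [hadd, ih]
      have hc : (!acc.contains c) = true := by simp [h]
      rw [if_pos hc, pvNub_cons, List.append_assoc, List.singleton_append]
      congr 2
      rw [List.filter_filter]
      congr 1
      apply List.filter_congr
      intro x _
      rcases Decidable.em (x ∈ acc) with hx | hx <;> rcases Decidable.em (x = c) with hc | hc <;>
        simp [hx, hc]

-- ===== VERDICT =====
theorem tower_element_keys_py_spec : Claim_equal_tower_element_keys_py := by
  intro tower _
  unfold Spec_tower_element_keys_py tower_element_keys_py tower_element_keys_py_alt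
  rw [pv_fold_interleave, pv_foldl_add_eq_nub]
  simp
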